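-- pv_equiv track=rewrite | github.com/k4lantar4/moonvpn | core/config/helpers.py | to_persian_numbers
-- ===== SOURCE A (Python) =====
-- def to_persian_numbers(text: str) -> str:
--     """Convert Western Arabic numerals to Persian numerals.
--
--     Args:
--         text: Text containing numbers.
--
--     Returns:
--         Text with Persian numbers.
--     """
--     persian_numbers = {
--         '0': '۰',
--         '1': '۱',
--         '2': '۲',
--         '3': '۳',
--         '4': '۴',
--         '5': '۵',
--         '6': '۶',
--         '7': '۷',
--         '8': '۸',
--         '9': '۹',
--     }
--
--     for eng, per in persian_numbers.items():
--         text = text.replace(eng, per)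
--
--     return text
-- ===== SOURCE B (Python) =====
-- def to_persian_numbers(text: str) -> str:
--     """Convert Western Arabic numerals to Persian numerals.
--
--     Single pass; each ASCII digit is shifted arithmetically to the
--     contiguous Persian digit block (U+06F0..U+06F9). No mapping table.
--     """
--     out = []
--     for ch in text:
--         if '0' <= ch <= '9':
--             out.append(chr(ord(ch) + 0x6C0))
--         else:
--             out.append(ch)
--     return ''.join(out)
-- ===== Notes on version B (the rewrite author's own statement) =====
-- stated objective: alternative
-- what changed: A rescans the whole string ten times with str.replace using a digit dict; B makes a single pass and maps each ASCII digit by an arithmetic codepoint shift (+0x6C0) into the contiguous Persian digit block, with no table at all.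
import Mathlib
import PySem

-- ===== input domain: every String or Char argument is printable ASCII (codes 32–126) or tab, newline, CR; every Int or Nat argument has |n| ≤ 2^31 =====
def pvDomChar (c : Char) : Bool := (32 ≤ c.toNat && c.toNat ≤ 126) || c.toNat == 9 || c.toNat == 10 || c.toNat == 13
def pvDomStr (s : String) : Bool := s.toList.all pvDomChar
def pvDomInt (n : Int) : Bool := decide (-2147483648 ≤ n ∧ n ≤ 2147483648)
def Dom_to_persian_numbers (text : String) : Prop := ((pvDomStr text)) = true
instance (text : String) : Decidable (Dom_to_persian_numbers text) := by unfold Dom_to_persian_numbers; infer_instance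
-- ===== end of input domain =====

-- B replaces A's ten full-string str.replace passes (digit→Persian dict) by one pass
-- that shifts each ASCII digit arithmetically (+0x6C0) into the contiguous Persian
-- digit block; no mapping table. Same return value.

-- ===== PORT A =====
-- the persian_numbers dict of A, in insertion order
def pvPairsA : List (String × String) :=
  [("0", "۰"), ("1", "۱"), ("2", "۲"), ("3", "۳"), ("4", "۴"),
   ("5", "۵"), ("6", "۶"), ("7", "۷"), ("8", "۸"), ("9", "۹")]

def to_persian_numbers (text : String) : String :=
  pvPairsA.foldl (fun t p => PySem.Str.replace t p.1 p.2) text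

-- ===== PORT B =====
-- Source B's loop: append the shifted digit (chr(ord(ch)+0x6C0)) or the char itself, then join
def to_persian_numbers_alt (text : String) : String :=
  String.ofList
    ((text.toList.foldl
      (fun out ch =>
        if '0' ≤ ch ∧ ch ≤ '9' then Char.ofNat (ch.toNat + 0x6C0) :: out
        else ch :: out) []).reverse)

-- ===== PRECONDITION & SPEC =====
def Spec_to_persian_numbers (text : String) (out : String) : Prop := out = to_persian_numbers_alt text
instance (text : String) (out : String) : Decidable (Spec_to_persian_numbers text out) := by unfold Spec_to_persian_numbers; infer_instance

-- ===== CLAIM (what is proved, stated in full; the proofs are below) =====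
def Claim_equal_to_persian_numbers : Prop := ∀ (text : String), Dom_to_persian_numbers text → Spec_to_persian_numbers text (to_persian_numbers text)

-- ===== LEMMAS AND PROOFS =====

-- single-character substitution
def pvSub (d p c : Char) : Char := if c = d then p else c

-- the combined digit→Persian character map
def pvF (c : Char) : Char :=
  if c = '0' then '۰' else if c = '1' then '۱' else if c = '2' then '۲'
  else if c = '3' then '۳' else if c = '4' then '۴' else if c = '5' then '۵'
  else if c = '6' then '۶' else if c = '7' then '۷' else if c = '8' then '۸'
  else if c = '9' then '۹' else c

lemma pv_go_single (d p : Char) (l : List Char) : ∀ (fuel : Nat) (acc : List Char),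
    l.length ≤ fuel →
    PySem.Chars.replace.go [d] [p] fuel l acc = acc.reverse ++ l.map (pvSub d p) := by
  induction l with
  | nil =>
    intro fuel acc _
    cases fuel <;> simp [PySem.Chars.replace.go]
  | cons c t ih =>
    intro fuel acc hle
    cases fuel with
    | zero => simp at hle
    | succ n =>
      have hlt : t.length ≤ n := by simpa using hle
      by_cases h : c = d
      · subst h
        have hpre : List.isPrefixOf [c] (c :: t) = true := by
          simp [List.isPrefixOf]
        simp only [PySem.Chars.replace.go, hpre, if_pos]
        have hdrop : List.drop [c].length (c :: t) = t := rfl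
        rw [hdrop, ih n _ hlt]
        simp [pvSub]
      · have hdc : (d == c) = false := beq_eq_false_iff_ne.mpr (fun x => h x.symm)
        have hpre : List.isPrefixOf [d] (c :: t) = false := by
          simp [List.isPrefixOf, hdc]
        simp only [PySem.Chars.replace.go, hpre]
        rw [if_neg (by simp), ih n _ hlt]
        simp [pvSub, h]

lemma pv_replace_single (s : List Char) (d p : Char) :
    PySem.Chars.replace s [d] [p] = s.map (pvSub d p) := by
  rw [PySem.Chars.replace]
  simp only [List.isEmpty_cons, Bool.false_eq_true, if_false]
  simpa using pv_go_single d p s s.length [] (le_refl _)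

lemma pv_chain_char (c : Char) :
    pvSub '9' '۹' (pvSub '8' '۸' (pvSub '7' '۷' (pvSub '6' '۶' (pvSub '5' '۵'
      (pvSub '4' '۴' (pvSub '3' '۳' (pvSub '2' '۲' (pvSub '1' '۱'
      (pvSub '0' '۰' c))))))))) = pvF c := by
  by_cases h0 : c = '0'; · subst h0; decide
  by_cases h1 : c = '1'; · subst h1; decide
  by_cases h2 : c = '2'; · subst h2; decide
  by_cases h3 : c = '3'; · subst h3; decide
  by_cases h4 : c = '4'; · subst h4; decide
  by_cases h5 : c = '5'; · subst h5; decide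
  by_cases h6 : c = '6'; · subst h6; decide
  by_cases h7 : c = '7'; · subst h7; decide
  by_cases h8 : c = '8'; · subst h8; decide
  by_cases h9 : c = '9'; · subst h9; decide
  simp [pvSub, pvF, h0, h1, h2, h3, h4, h5, h6, h7, h8, h9]

-- B's per-character arithmetic shift agrees with the combined map pvF
lemma pv_shift_char (c : Char) :
    (if '0' ≤ c ∧ c ≤ '9' then Char.ofNat (c.toNat + 0x6C0) else c) = pvF c := by
  by_cases h0 : c = '0'; · subst h0; decide
  by_cases h1 : c = '1'; · subst h1; decide
  by_cases h2 : c = '2'; · subst h2; decide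
  by_cases h3 : c = '3'; · subst h3; decide
  by_cases h4 : c = '4'; · subst h4; decide
  by_cases h5 : c = '5'; · subst h5; decide
  by_cases h6 : c = '6'; · subst h6; decide
  by_cases h7 : c = '7'; · subst h7; decide
  by_cases h8 : c = '8'; · subst h8; decide
  by_cases h9 : c = '9'; · subst h9; decide
  have hnd : ¬ ('0' ≤ c ∧ c ≤ '9') := by
    rintro ⟨hlo, hhi⟩
    have hlo' : 48 ≤ c.toNat := hlo
    have hhi' : c.toNat ≤ 57 := hhi
    have hofnat : Char.ofNat c.toNat = c := Char.ofNat_toNat c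
    have n0 : c.toNat ≠ 48 := fun h => h0 (by rw [← hofnat, h])
    have n1 : c.toNat ≠ 49 := fun h => h1 (by rw [← hofnat, h])
    have n2 : c.toNat ≠ 50 := fun h => h2 (by rw [← hofnat, h])
    have n3 : c.toNat ≠ 51 := fun h => h3 (by rw [← hofnat, h])
    have n4 : c.toNat ≠ 52 := fun h => h4 (by rw [← hofnat, h])
    have n5 : c.toNat ≠ 53 := fun h => h5 (by rw [← hofnat, h])
    have n6 : c.toNat ≠ 54 := fun h => h6 (by rw [← hofnat, h])
    have n7 : c.toNat ≠ 55 := fun h => h7 (by rw [← hofnat, h])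
    have n8 : c.toNat ≠ 56 := fun h => h8 (by rw [← hofnat, h])
    have n9 : c.toNat ≠ 57 := fun h => h9 (by rw [← hofnat, h])
    omega
  simp [pvF, hnd, h0, h1, h2, h3, h4, h5, h6, h7, h8, h9]

-- the fold in B's port builds the mapped list in reverse
lemma pv_fold_rev (l : List Char) : ∀ (acc : List Char),
    (l.foldl
      (fun out ch =>
        if '0' ≤ ch ∧ ch ≤ '9' then Char.ofNat (ch.toNat + 0x6C0) :: out
        else ch :: out) acc) = (l.map pvF).reverse ++ acc := by
  induction l with
  | nil => intro acc; simp
  | cons c t ih =>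
    intro acc
    simp only [List.foldl, List.map, List.reverse_cons]
    rw [show (if '0' ≤ c ∧ c ≤ '9' then Char.ofNat (c.toNat + 0x6C0) :: acc else c :: acc)
        = (if '0' ≤ c ∧ c ≤ '9' then Char.ofNat (c.toNat + 0x6C0) else c) :: acc by
          split_ifs <;> rfl]
    rw [pv_shift_char, ih]
    simp

-- ===== VERDICT (by name: the statement is the Claim_ definition above) =====
set_option maxHeartbeats 1000000 in
theorem to_persian_numbers_spec : Claim_equal_to_persian_numbers := by
  intro text _
  show to_persian_numbers text = to_persian_numbers_alt text
  apply String.toList_inj.mp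
  have hA : (to_persian_numbers text).toList = text.toList.map pvF := by
    simp only [to_persian_numbers, pvPairsA, List.foldl, PySem.Str.replace]
    simp only [String.toList_ofList]
    simp only [show ("0" : String).toList = ['0'] from rfl,
      show ("1" : String).toList = ['1'] from rfl,
      show ("2" : String).toList = ['2'] from rfl,
      show ("3" : String).toList = ['3'] from rfl,
      show ("4" : String).toList = ['4'] from rfl,
      show ("5" : String).toList = ['5'] from rfl,
      show ("6" : String).toList = ['6'] from rfl,
      show ("7" : String).toList = ['7'] from rfl,
      show ("8" : String).toList = ['8'] from rfl,
      show ("9" : String).toList = ['9'] from rfl,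
      show ("۰" : String).toList = ['۰'] from rfl,
      show ("۱" : String).toList = ['۱'] from rfl,
      show ("۲" : String).toList = ['۲'] from rfl,
      show ("۳" : String).toList = ['۳'] from rfl,
      show ("۴" : String).toList = ['۴'] from rfl,
      show ("۵" : String).toList = ['۵'] from rfl,
      show ("۶" : String).toList = ['۶'] from rfl,
      show ("۷" : String).toList = ['۷'] from rfl,
      show ("۸" : String).toList = ['۸'] from rfl,
      show ("۹" : String).toList = ['۹'] from rfl]
    simp only [pv_replace_single, List.map_map]
    apply List.map_congr_left
    intro c _
    simp only [Function.comp_apply]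
    exact pv_chain_char c
  have hB : (to_persian_numbers_alt text).toList = text.toList.map pvF := by
    simp only [to_persian_numbers_alt, pv_fold_rev, String.toList_ofList]
    simp
  rw [hA, hB]
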